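-- pv_equiv track=rewrite | github.com/cabbage556/Data-Structure-and-Algorithm | dynamic_programming/100을 초과하게 하는 수 제외하기.py | add_until_100
-- ===== SOURCE A (Python) =====
-- def add_until_100(arr):
--     # 기저 조건
--     if len(arr) == 0:
--         return 0
--
--     # 재귀 호출의 결과를 변수에 저장해 불필요한 재귀 호출을 방지함
--     current_sum = add_until_100(arr[1:])
--
--     if arr[0] + current_sum > 100:
--         return current_sum
--     else:
--         return arr[0] + current_sum
-- ===== SOURCE B (Python) =====
-- def add_until_100(arr):
--     total = 0
--     for x in reversed(arr):
--         if x + total <= 100: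
--             total += x
--     return total
-- ===== Notes on version B (the rewrite author's own statement) =====
-- stated objective: faster
-- what changed: Replaces the recursion (and its per-call list slicing) with a single iterative loop over reversed(arr) maintaining only the running sum.
import Mathlib
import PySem

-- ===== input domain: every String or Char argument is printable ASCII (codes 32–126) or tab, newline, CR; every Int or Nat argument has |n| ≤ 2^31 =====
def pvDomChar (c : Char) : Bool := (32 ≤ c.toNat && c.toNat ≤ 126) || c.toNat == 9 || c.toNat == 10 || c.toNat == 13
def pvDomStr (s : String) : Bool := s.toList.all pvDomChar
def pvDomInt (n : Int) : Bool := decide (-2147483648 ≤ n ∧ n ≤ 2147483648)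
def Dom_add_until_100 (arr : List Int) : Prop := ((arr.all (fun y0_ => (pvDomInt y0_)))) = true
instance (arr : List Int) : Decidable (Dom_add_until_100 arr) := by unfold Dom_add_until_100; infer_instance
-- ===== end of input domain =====

-- B replaces A's recursion (with per-call slicing) by one loop over the reversed list keeping only the running sum; return values are equal, B is simpler.

-- ===== PORT A =====
def add_until_100 (arr : List Int) : Int :=
  match arr with
  | [] => 0
  | x :: rest =>
    let current_sum := add_until_100 rest
    if x + current_sum > 100 then current_sum else x + current_sum

-- ===== PORT B =====
def add_until_100_alt (arr : List Int) : Int :=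
  arr.reverse.foldl (fun total x => if x + total ≤ 100 then total + x else total) 0

-- ===== PRECONDITION & SPEC =====
def Spec_add_until_100 (arr : List Int) (out : Int) : Prop := out = add_until_100_alt arr
instance (arr : List Int) (out : Int) : Decidable (Spec_add_until_100 arr out) := by unfold Spec_add_until_100; infer_instance

-- ===== CLAIM (what is proved, stated in full; the proofs are below) =====
def Claim_equal_add_until_100 : Prop := ∀ (arr : List Int), Dom_add_until_100 arr → Spec_add_until_100 arr (add_until_100 arr)

-- ===== LEMMAS AND PROOFS =====
theorem add_until_100_eq_alt (arr : List Int) : add_until_100 arr = add_until_100_alt arr := by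
  induction arr with
  | nil => rfl
  | cons x rest ih =>
    simp only [add_until_100, add_until_100_alt, List.reverse_cons, List.foldl_append,
      List.foldl_cons, List.foldl_nil] at *
    rw [← ih]
    by_cases h : x + add_until_100 rest ≤ 100
    · simp [h, not_lt.mpr h, Int.add_comm]
    · simp [h, Int.not_le.mp h]

-- ===== VERDICT (by name: the statement is the Claim_ definition above) =====
theorem add_until_100_spec : Claim_equal_add_until_100 := by
  intro arr _
  exact add_until_100_eq_alt arr
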